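-- pv_equiv track=rewrite | github.com/shahdarshil123/PSA-NEU | practice/practice_1.py | maxSeq
-- ===== SOURCE A (Python) =====
-- def maxSeq(a):
--     short = a[0]
--     for i in range(len(a)):
--         if(len(a[i])<len(short)):
--             short = a[i]
--     index = 0
--     s = ""
--     for i in range(len(short)):
--         if(helper(a,i,short[i])):
--             s += short[i]
--     return(s)
--
-- def helper(a,pos,letter):
--     for j in range(len(a)):
--         if(a[j][pos]!=letter):
--             return(False)
--     return(True)
-- ===== SOURCE B (Python) =====
-- def maxSeq(a):
--     acc = list(a[0])
--     for s in a[1:]: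
--         acc = [c if c == d else None for c, d in zip(acc, s)]
--     return "".join(c for c in acc if c is not None)
-- ===== Notes on version B (the rewrite author's own statement) =====
-- stated objective: alternative
-- what changed: Replaces A's shortest-string search plus a per-position helper that rescans all strings with a single left fold over the strings that maintains a running positional intersection (a list of optional characters, zip-truncated at each step), joined at the end.
import Mathlib
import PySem

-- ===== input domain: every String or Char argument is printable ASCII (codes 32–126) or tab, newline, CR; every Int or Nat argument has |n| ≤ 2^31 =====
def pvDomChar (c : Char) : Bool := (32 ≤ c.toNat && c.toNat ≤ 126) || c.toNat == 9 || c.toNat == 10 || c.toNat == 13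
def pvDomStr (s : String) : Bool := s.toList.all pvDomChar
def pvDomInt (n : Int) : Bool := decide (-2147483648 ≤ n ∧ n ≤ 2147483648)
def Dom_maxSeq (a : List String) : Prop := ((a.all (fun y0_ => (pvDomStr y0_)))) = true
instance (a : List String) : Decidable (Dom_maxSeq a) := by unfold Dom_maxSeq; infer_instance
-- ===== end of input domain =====

-- B replaces A's shortest-string search and per-position helper rescans with a single
-- left fold over the strings maintaining a running positional intersection (alternative, same cost).

-- ===== PORT A =====
-- helper(a, pos, letter): early-return loop over j ∈ range(len(a)); a[j][pos] via pyGetD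
-- (in range on every input admitted by Pre_maxSeq, since pos ranges below the minimal length)
def pvHelperA (a : List String) (pos : Int) (letter : Char) : Bool :=
  (PySem.List.pyRange 0 a.length 1).all fun j =>
    PySem.List.pyGetD (PySem.List.pyGetD a j "").toList pos ' ' == letter

-- literal port of A: find the (first) shortest string, then append short[i] whenever helper holds
def maxSeq (a : List String) : String :=
  let short0 := PySem.List.pyGetD a 0 ""
  let short := (PySem.List.pyRange 0 a.length 1).foldl
    (fun short i =>
      if (PySem.List.pyGetD a i "").toList.length < short.toList.length
      then PySem.List.pyGetD a i "" else short) short0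
  String.ofList ((PySem.List.pyRange 0 short.toList.length 1).foldl
    (fun s i =>
      if pvHelperA a i (PySem.List.pyGetD short.toList i ' ')
      then s ++ [PySem.List.pyGetD short.toList i ' ']
      else s) [])

-- ===== PORT B =====
-- literal port of B: acc = list(a[0]); for s in a[1:]: acc = [c if c == d else None
-- for c, d in zip(acc, s)]; return join of the non-None entries.  zip = List.zipWith,
-- the per-pair expression 'c if c == d else None' = 'if o = some d then o else none'.
def maxSeq_alt (a : List String) : String :=
  let acc0 := (PySem.List.pyGetD a 0 "").toList.map some
  let acc := (PySem.List.slice a (some 1) none).foldl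
    (fun acc s => List.zipWith (fun o d => if o = some d then o else none) acc s.toList) acc0
  String.ofList (acc.filterMap id)

-- ===== PRECONDITION & SPEC =====
-- Pre_ excludes only the empty list, on which A raises IndexError at a[0].
def Pre_maxSeq (a : List String) : Prop := a ≠ []
instance (a : List String) : Decidable (Pre_maxSeq a) := by unfold Pre_maxSeq; infer_instance
def pvWitness_maxSeq : List String := ["ab", "ac"]

def Spec_maxSeq (a : List String) (out : String) : Prop := out = maxSeq_alt a
instance (a : List String) (out : String) : Decidable (Spec_maxSeq a out) := by unfold Spec_maxSeq; infer_instance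

-- ===== CLAIM (what is proved, stated in full; the proofs are below) =====
def Claim_equal_maxSeq : Prop := ∀ (a : List String), Dom_maxSeq a → Pre_maxSeq a → Spec_maxSeq a (maxSeq a)

-- ===== LEMMAS AND PROOFS =====

-- A's first loop keeps a member of minimal length
theorem pvFoldMin (l : List String) (init : String) :
    (l.foldl (fun acc s => if s.toList.length < acc.toList.length then s else acc) init = init
      ∨ l.foldl (fun acc s => if s.toList.length < acc.toList.length then s else acc) init ∈ l)
    ∧ (l.foldl (fun acc s => if s.toList.length < acc.toList.length then s else acc) init).toList.length
        ≤ init.toList.length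
    ∧ ∀ s ∈ l, (l.foldl (fun acc s => if s.toList.length < acc.toList.length then s else acc) init).toList.length
        ≤ s.toList.length := by
  induction l generalizing init with
  | nil => exact ⟨Or.inl rfl, le_refl _, by simp⟩
  | cons s l ih =>
    simp only [List.foldl_cons]
    obtain ⟨ih1, ih2, ih3⟩ := ih (if s.toList.length < init.toList.length then s else init)
    refine ⟨?_, ?_, ?_⟩
    · rcases ih1 with h | h
      · rw [h]
        split
        · exact Or.inr (List.mem_cons_self ..)
        · exact Or.inl rfl
      · exact Or.inr (List.mem_cons_of_mem _ h)
    · refine le_trans ih2 ?_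
      split <;> omega
    · intro t ht
      rcases List.mem_cons.mp ht with rfl | ht'
      · refine le_trans ih2 ?_
        split <;> omega
      · exact ih3 t ht'

-- helper(a, pos, letter) checks every string of a at pos
theorem pvHelperA_eq (a : List String) (pos : Int) (letter : Char) :
    pvHelperA a pos letter = a.all (fun s => PySem.List.pyGetD s.toList pos ' ' == letter) := by
  unfold pvHelperA
  conv_rhs => rw [← PySem.List.map_pyGetD_pyRange_zero' a ""]
  rw [List.all_map]
  rfl

-- the running minimum of the lengths: bounds and attainment
theorem pvMlenSpec (l : List String) (init : Nat) :
    (l.foldl (fun n s => min n s.toList.length) init ≤ init)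
    ∧ (∀ s ∈ l, l.foldl (fun n s => min n s.toList.length) init ≤ s.toList.length)
    ∧ (l.foldl (fun n s => min n s.toList.length) init = init
        ∨ ∃ s ∈ l, l.foldl (fun n s => min n s.toList.length) init = s.toList.length) := by
  induction l generalizing init with
  | nil => exact ⟨le_refl _, by simp, Or.inl rfl⟩
  | cons s l ih =>
    simp only [List.foldl_cons]
    obtain ⟨ih1, ih2, ih3⟩ := ih (min init s.toList.length)
    refine ⟨le_trans ih1 (by omega), ?_, ?_⟩
    · intro t ht
      rcases List.mem_cons.mp ht with rfl | ht'
      · exact le_trans ih1 (by omega)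
      · exact ih2 t ht'
    · rcases ih3 with h | ⟨t, ht, h⟩
      · rcases Nat.le_total init s.toList.length with hle | hle
        · left; rw [h]; omega
        · right; exact ⟨s, List.mem_cons_self .., by rw [h]; omega⟩
      · right; exact ⟨t, List.mem_cons_of_mem _ ht, h⟩

-- B's fold computes the positional intersection in closed form
theorem pvFoldInter (l : List String) (acc : List (Option Char)) :
    l.foldl (fun acc s => List.zipWith (fun o d => if o = some d then o else none) acc s.toList) acc
      = (List.range (l.foldl (fun n s => min n s.toList.length) acc.length)).map
          (fun k => (acc.getD k none).bind
            (fun c => if l.all (fun s => s.toList.getD k ' ' == c) then some c else none)) := by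
  induction l generalizing acc with
  | nil =>
    simp only [List.foldl_nil, List.all_nil, if_pos trivial]
    refine (List.ext_getElem (by simp) ?_).symm
    intro i h1 h2
    simp only [List.length_map, List.length_range] at h1
    simp [List.getElem?_eq_getElem h1]
  | cons s l ih =>
    simp only [List.foldl_cons]
    rw [ih]
    have hlen : (List.zipWith (fun o d => if o = some d then o else none) acc s.toList).length
        = min acc.length s.toList.length := List.length_zipWith ..
    rw [hlen]
    apply List.map_congr_left
    intro k hk
    rw [List.mem_range] at hk
    have hN := (pvMlenSpec l (min acc.length s.toList.length)).1
    have hka : k < acc.length := by omega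
    have hks : k < s.toList.length := by omega
    have hkz : k < (List.zipWith (fun o d => if o = some d then o else none) acc s.toList).length := by
      rw [hlen]; omega
    rw [List.getD_eq_getElem _ none hkz, List.getElem_zipWith,
        List.getD_eq_getElem acc none hka]
    cases hacc : acc[k] with
    | none => simp
    | some c =>
      simp only [List.all_cons, List.getD_eq_getElem s.toList ' ' hks]
      by_cases hcd : c = s.toList[k]
      · simp [hcd]
      · have h1 : (some c = some s.toList[k]) = False := by simp [hcd]
        simp [h1]
        exact fun h => absurd h.symm hcd

-- both all-equal tests agree, given two members to compare against
theorem pvAll_eq (a : List String) (x y : String) (hx : x ∈ a) (hy : y ∈ a) (k : Nat) :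
    a.all (fun s => s.toList.getD k ' ' == x.toList.getD k ' ')
      = a.all (fun s => s.toList.getD k ' ' == y.toList.getD k ' ') := by
  by_cases hX : a.all (fun s => s.toList.getD k ' ' == x.toList.getD k ' ') = true
  · rw [hX]
    symm
    rw [List.all_eq_true] at hX ⊢
    intro s hs
    have h1 := hX s hs
    have h2 := hX y hy
    simp only [beq_iff_eq] at *
    rw [h1, h2]
  · by_cases hY : a.all (fun s => s.toList.getD k ' ' == y.toList.getD k ' ') = true
    · exfalso
      apply hX
      rw [List.all_eq_true] at hY ⊢
      intro s hs
      have h1 := hY s hs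
      have h2 := hY x hx
      simp only [beq_iff_eq] at *
      rw [h1, h2]
    · simp only [Bool.not_eq_true] at hX hY
      rw [hX, hY]

-- filterMap of a pointwise if-then-some is filter-then-map
theorem pvFilterMapIf (l : List Nat) (p : Nat → Bool) (f : Nat → Char) (g : Nat → Option Char)
    (h : ∀ k ∈ l, g k = if p k then some (f k) else none) :
    l.filterMap g = (l.filter p).map f := by
  induction l with
  | nil => rfl
  | cons x l ih =>
    have hx := h x (List.mem_cons_self ..)
    have ih' := ih (fun k hk => h k (List.mem_cons_of_mem _ hk))
    by_cases hp : p x = true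
    · simp [hx, hp, ih']
    · rw [Bool.not_eq_true] at hp
      simp [hx, hp, ih']

-- ===== VERDICT (by name: the statement is the Claim_ definition above) =====
theorem maxSeq_spec : Claim_equal_maxSeq := by
  intro a _ hpre
  obtain ⟨s0, rest, rfl⟩ : ∃ s0 rest, a = s0 :: rest := by
    cases a with
    | nil => exact absurd rfl hpre
    | cons s0 rest => exact ⟨s0, rest, rfl⟩
  obtain ⟨hmem, -, hmin⟩ := pvFoldMin (s0 :: rest) s0
  set short := (s0 :: rest).foldl
      (fun acc s => if s.toList.length < acc.toList.length then s else acc) s0 with hshort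
  have hshort_mem : short ∈ s0 :: rest := by
    rcases hmem with h | h
    · show short ∈ s0 :: rest
      rw [h]; exact List.mem_cons_self ..
    · exact h
  set m := short.toList.length with hm
  set pA : Nat → Bool :=
    fun k => (s0 :: rest).all (fun s => s.toList.getD k ' ' == short.toList.getD k ' ') with hpA
  set pB : Nat → Bool :=
    fun k => (s0 :: rest).all (fun s => s.toList.getD k ' ' == s0.toList.getD k ' ') with hpB
  -- A in canonical form
  have hA : maxSeq (s0 :: rest)
      = String.ofList (((List.range m).filter pA).map (fun k => short.toList.getD k ' ')) := by
    unfold maxSeq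
    simp only [PySem.List.pyGetD_zero_cons]
    rw [show (PySem.List.pyRange 0 ((s0 :: rest).length : Int) 1).foldl
        (fun sh i => if (PySem.List.pyGetD (s0 :: rest) i "").toList.length < sh.toList.length
          then PySem.List.pyGetD (s0 :: rest) i "" else sh) s0 = short from
      PySem.List.foldl_pyRange_zero_pyGetD' (s0 :: rest) ""
        (fun acc s => if s.toList.length < acc.toList.length then s else acc) s0]
    rw [PySem.List.pyRange_zero_nat, List.foldl_map]
    simp only [PySem.List.pyGetD_natCast]
    rw [PySem.List.foldl_append_if
      (fun k : Nat => pvHelperA (s0 :: rest) (k : Int) (short.toList.getD k ' '))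
      (fun k : Nat => short.toList.getD k ' ') (List.range m) []]
    rw [List.nil_append]
    refine congrArg _ (congrArg _ (List.filter_congr ?_))
    intro k _
    rw [pvHelperA_eq]
    simp only [PySem.List.pyGetD_natCast, hpA]
  -- the minimum of the lengths is short's length
  have hNspec := pvMlenSpec rest s0.toList.length
  have hN : rest.foldl (fun n s => min n s.toList.length) s0.toList.length = m := by
    apply Nat.le_antisymm
    · rcases List.mem_cons.mp hshort_mem with h | h
      · rw [hm, h]; exact hNspec.1
      · exact hNspec.2.1 short h
    · rcases hNspec.2.2 with h | ⟨t, ht, h⟩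
      · rw [h]; exact hmin s0 (List.mem_cons_self ..)
      · rw [h]; exact hmin t (List.mem_cons_of_mem _ ht)
  -- B in canonical form
  have hB : maxSeq_alt (s0 :: rest)
      = String.ofList (((List.range m).filter pB).map (fun k => s0.toList.getD k ' ')) := by
    unfold maxSeq_alt
    simp only [PySem.List.pyGetD_zero_cons, PySem.List.slice_from_one, List.tail_cons]
    rw [pvFoldInter rest (s0.toList.map some), List.length_map, hN]
    rw [List.filterMap_map]
    congr 1
    apply pvFilterMapIf
    intro k hk
    rw [List.mem_range] at hk
    have hk0 : k < s0.toList.length := by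
      have := hNspec.1; omega
    have hgd : (s0.toList.map some).getD k none = some (s0.toList.getD k ' ') := by
      rw [List.getD_eq_getElem _ none (by simpa using hk0), List.getElem_map,
          List.getD_eq_getElem s0.toList ' ' hk0]
    simp only [Function.comp, hgd, Option.bind_some]
    have hself : (s0.toList.getD k ' ' == s0.toList.getD k ' ') = true := by simp
    rw [hpB]
    simp only [List.all_cons, hself, Bool.true_and]
    rfl
  -- assemble
  show maxSeq (s0 :: rest) = maxSeq_alt (s0 :: rest)
  rw [hA, hB]
  have hfilter : (List.range m).filter pA = (List.range m).filter pB := by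
    apply List.filter_congr
    intro k _
    exact pvAll_eq (s0 :: rest) short s0 hshort_mem (List.mem_cons_self ..) k
  rw [hfilter]
  congr 1
  apply List.map_congr_left
  intro k hk
  have hPB : pB k = true := (List.mem_filter.mp hk).2
  rw [hpB] at hPB
  simp only [List.all_eq_true, beq_iff_eq] at hPB
  exact hPB short hshort_mem
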